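-- pv_equiv track=rewrite | github.com/D0nald-Chump/Finagent_v1 | modules/dataloader/sec/sec_client.py | pick_xbrl_artifacts
-- ===== SOURCE A (Python) =====
-- from typing import Dict, List, Tuple
--
-- def pick_xbrl_artifacts(items: List[Dict]) -> Dict[str, str | None]:
--     names = [it["name"] for it in items]
--     instance = None
--     for n in names:
--         if n.endswith(("_htm.xml", "_ixbrl.xml", ".xml")) and ("htm" in n or "ixbrl" in n):
--             instance = n
--             break
--     if not instance:
--         cand = [n for n in names if n.endswith(".xml") and not any(s in n for s in ["_pre", "_cal", "_def", "_lab"])]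
--         instance = cand[0] if cand else None
--
--     def find_one(suffix: str):
--         for n in names:
--             if n.endswith(suffix):
--                 return n
--         return None
--
--     return {
--         "instance": instance,
--         "pre": find_one("_pre.xml"),
--         "def": find_one("_def.xml"),
--         "lab": find_one("_lab.xml"),
--         "cal": find_one("_cal.xml"),
--     }
-- ===== SOURCE B (Python) =====
-- def pick_xbrl_artifacts(items):
--     SUFFIXES = ("_pre.xml", "_def.xml", "_lab.xml", "_cal.xml")
--     MARKERS = ("_pre", "_cal", "_def", "_lab")
--     primary = None      # first name matching the instance predicate
--     fallback = None     # first plain .xml name without any marker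
--     by_suffix = {}      # suffix -> first name ending with it
--     for it in items:
--         n = it["name"]
--         if primary is None and n.endswith(".xml") and ("htm" in n or "ixbrl" in n):
--             primary = n
--         if fallback is None and n.endswith(".xml") and not any(m in n for m in MARKERS):
--             fallback = n
--         for suf in SUFFIXES:
--             if n.endswith(suf):
--                 by_suffix.setdefault(suf, n)
--     instance = primary if primary is not None else fallback
--     return {
--         "instance": instance,
--         "pre": by_suffix.get("_pre.xml"),
--         "def": by_suffix.get("_def.xml"),
--         "lab": by_suffix.get("_lab.xml"),
--         "cal": by_suffix.get("_cal.xml"),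
--     }
-- ===== Notes on version B (the rewrite author's own statement) =====
-- stated objective: alternative
-- what changed: A scans the names list five separate times (instance loop, a filter pass for the fallback, and four find_one scans); B makes one pass over the names maintaining the first primary candidate, the first marker-free .xml fallback, and a suffix->first-name dict, then reads the result from that state.
import Mathlib
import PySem

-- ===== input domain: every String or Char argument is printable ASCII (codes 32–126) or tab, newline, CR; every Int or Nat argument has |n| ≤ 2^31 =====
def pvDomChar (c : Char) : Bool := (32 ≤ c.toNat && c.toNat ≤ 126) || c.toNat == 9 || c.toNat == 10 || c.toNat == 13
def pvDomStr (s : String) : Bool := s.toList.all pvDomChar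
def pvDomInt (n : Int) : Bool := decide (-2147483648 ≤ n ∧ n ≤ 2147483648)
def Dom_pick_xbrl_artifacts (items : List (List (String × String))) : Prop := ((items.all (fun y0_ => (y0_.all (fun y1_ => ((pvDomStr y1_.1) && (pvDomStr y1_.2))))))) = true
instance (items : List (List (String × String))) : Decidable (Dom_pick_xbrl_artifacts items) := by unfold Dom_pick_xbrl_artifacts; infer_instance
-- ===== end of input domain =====

-- B replaces A's four separate find_one scans and the filter pass by ONE pass over the names
-- maintaining the first primary/fallback candidates and a suffix -> first-name dict (objective: alternative).

-- ===== PORT A =====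
def pvGetName (it : List (String × String)) : String :=
  ((PySem.Dict.mk it).get? "name").getD ""   -- it["name"]; the "" default is unreachable under Pre_

def pvInstP (n : String) : Bool :=
  (PySem.Str.endswith n "_htm.xml" || PySem.Str.endswith n "_ixbrl.xml" || PySem.Str.endswith n ".xml")
    && (PySem.Str.isIn "htm" n || PySem.Str.isIn "ixbrl" n)

def pvCandP (n : String) : Bool :=
  PySem.Str.endswith n ".xml" && !(["_pre", "_cal", "_def", "_lab"].any (fun s => PySem.Str.isIn s n))

def pvInstLoop : List String → Option String
  | [] => none
  | n :: rest => if pvInstP n then some n else pvInstLoop rest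

def pvFindOne : List String → String → Option String
  | [], _ => none
  | n :: rest, suffix => if PySem.Str.endswith n suffix then some n else pvFindOne rest suffix

def pick_xbrl_artifacts (items : List (List (String × String))) : List (String × Option String) :=
  let names := items.map pvGetName
  let inst0 := pvInstLoop names
  let inst := if inst0.getD "" = "" then (names.filter pvCandP).head? else inst0
  [("instance", inst),
   ("pre", pvFindOne names "_pre.xml"),
   ("def", pvFindOne names "_def.xml"),
   ("lab", pvFindOne names "_lab.xml"),
   ("cal", pvFindOne names "_cal.xml")]

-- ===== PORT B =====
def pvSuffixes : List String := ["_pre.xml", "_def.xml", "_lab.xml", "_cal.xml"]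
def pvMarkers : List String := ["_pre", "_cal", "_def", "_lab"]

def pvPrimaryP (n : String) : Bool :=
  PySem.Str.endswith n ".xml" && (PySem.Str.isIn "htm" n || PySem.Str.isIn "ixbrl" n)

def pvFallbackP (n : String) : Bool :=
  PySem.Str.endswith n ".xml" && !(pvMarkers.any (fun m => PySem.Str.isIn m n))

def pvBStep (st : Option String × Option String × PySem.Dict String String) (n : String) :
    Option String × Option String × PySem.Dict String String :=
  (if st.1.isNone && pvPrimaryP n then some n else st.1,
   if st.2.1.isNone && pvFallbackP n then some n else st.2.1,
   pvSuffixes.foldl (fun d suf => if PySem.Str.endswith n suf then d.setdefault suf n else d) st.2.2)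

def pick_xbrl_artifacts_alt (items : List (List (String × String))) : List (String × Option String) :=
  let st := items.foldl (fun st it => pvBStep st (pvGetName it)) (none, none, PySem.Dict.empty)
  let inst := match st.1 with
    | some n => some n
    | none => st.2.1
  [("instance", inst),
   ("pre", st.2.2.get? "_pre.xml"),
   ("def", st.2.2.get? "_def.xml"),
   ("lab", st.2.2.get? "_lab.xml"),
   ("cal", st.2.2.get? "_cal.xml")]

-- ===== PRECONDITION & SPEC =====
-- Pre_ excludes items missing the "name" key, on which the Python A raises KeyError (B raises there too).
def Pre_pick_xbrl_artifacts (items : List (List (String × String))) : Prop :=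
  (items.all (fun it => it.any (fun p => p.1 == "name"))) = true
instance (items : List (List (String × String))) : Decidable (Pre_pick_xbrl_artifacts items) := by
  unfold Pre_pick_xbrl_artifacts; infer_instance

def pvWitness_pick_xbrl_artifacts : (List (List (String × String))) :=
  [[("name", "abc_htm.xml")], [("name", "abc_pre.xml")]]

def Spec_pick_xbrl_artifacts (items : List (List (String × String))) (out : List (String × Option String)) : Prop := out = pick_xbrl_artifacts_alt items
instance (items : List (List (String × String))) (out : List (String × Option String)) : Decidable (Spec_pick_xbrl_artifacts items out) := by unfold Spec_pick_xbrl_artifacts; infer_instance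

-- ===== CLAIM (what is proved, stated in full; the proofs are below) =====
def Claim_equal_pick_xbrl_artifacts : Prop := ∀ (items : List (List (String × String))), Dom_pick_xbrl_artifacts items → Pre_pick_xbrl_artifacts items → Spec_pick_xbrl_artifacts items (pick_xbrl_artifacts items)

-- ===== LEMMAS AND PROOFS =====

lemma pv_endswith_mono (n p q : String) (h : q.toList <:+ p.toList)
    (hp : PySem.Str.endswith n p = true) : PySem.Str.endswith n q = true := by
  simp only [PySem.Str.endswith_eq] at *
  exact (PySem.Chars.endswith_iff _ _).mpr (h.trans ((PySem.Chars.endswith_iff _ _).mp hp))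

lemma pv_instP_eq (n : String) : pvInstP n = pvPrimaryP n := by
  by_cases h : PySem.Str.endswith n ".xml" = true
  · simp only [pvInstP, pvPrimaryP]
    rw [h]; simp
  · have h1 : PySem.Str.endswith n "_htm.xml" ≠ true :=
      fun hp => h (pv_endswith_mono n _ _ (by decide) hp)
    have h2 : PySem.Str.endswith n "_ixbrl.xml" ≠ true :=
      fun hp => h (pv_endswith_mono n _ _ (by decide) hp)
    simp only [pvInstP, pvPrimaryP]
    rw [Bool.eq_false_iff.mpr h, Bool.eq_false_iff.mpr h1, Bool.eq_false_iff.mpr h2]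
    simp

lemma pv_instP_eq_fun : pvInstP = pvPrimaryP := funext pv_instP_eq

lemma pv_candP_eq : pvCandP = pvFallbackP := rfl

lemma pv_instLoop_eq_find? (names : List String) : pvInstLoop names = names.find? pvInstP := by
  induction names with
  | nil => rfl
  | cons n rest ih => simp only [pvInstLoop, List.find?_cons]; cases h : pvInstP n <;> simp [h, ih]

lemma pv_findOne_eq_find? (names : List String) (suffix : String) :
    pvFindOne names suffix = names.find? (fun n => PySem.Str.endswith n suffix) := by
  induction names with
  | nil => rfl
  | cons n rest ih =>
    simp only [pvFindOne, List.find?_cons]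
    cases h : PySem.Str.endswith n suffix <;> simp [h, ih]

lemma pv_head?_filter_eq_find? (p : String → Bool) (names : List String) :
    (names.filter p).head? = names.find? p := by
  induction names with
  | nil => rfl
  | cons n rest ih =>
    simp only [List.filter_cons, List.find?_cons]
    cases h : p n <;> simp [h, ih]

lemma pv_instP_ne_empty (n : String) (h : pvInstP n = true) : n ≠ "" := by
  intro hn; subst hn; exact absurd h (by decide)

lemma pv_bfold_fst (names : List String) :
    ∀ (p f : Option String) (d : PySem.Dict String String),
      (names.foldl pvBStep (p, f, d)).1 = p.or (names.find? pvPrimaryP) := by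
  induction names with
  | nil => intro p f d; simp
  | cons n rest ih =>
    intro p f d
    simp only [List.foldl_cons, pvBStep, ih, List.find?_cons]
    cases p <;> cases h : pvPrimaryP n <;> simp [h]

lemma pv_bfold_snd (names : List String) :
    ∀ (p f : Option String) (d : PySem.Dict String String),
      (names.foldl pvBStep (p, f, d)).2.1 = f.or (names.find? pvFallbackP) := by
  induction names with
  | nil => intro p f d; simp
  | cons n rest ih =>
    intro p f d
    simp only [List.foldl_cons, pvBStep, ih, List.find?_cons]
    cases f <;> cases h : pvFallbackP n <;> simp [h]

lemma pv_dstep_get?_of_not_mem (sufs : List String) (n k : String) :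
    ∀ (d : PySem.Dict String String), k ∉ sufs →
    (sufs.foldl (fun d suf => if PySem.Str.endswith n suf then d.setdefault suf n else d) d).get? k
      = d.get? k := by
  induction sufs with
  | nil => intro d _; rfl
  | cons s rest ih =>
    intro d hk
    simp only [List.mem_cons, not_or] at hk
    simp only [List.foldl_cons]
    rw [ih _ hk.2]
    split
    · exact PySem.Dict.get?_setdefault_of_ne _ _ hk.1
    · rfl

lemma pv_dstep_get? (sufs : List String) (n k : String) :
    ∀ (d : PySem.Dict String String), k ∈ sufs → sufs.Nodup →
    (sufs.foldl (fun d suf => if PySem.Str.endswith n suf then d.setdefault suf n else d) d).get? k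
      = (d.get? k).or (if PySem.Str.endswith n k then some n else none) := by
  induction sufs with
  | nil => intro d hk _; cases hk
  | cons s rest ih =>
    intro d hk hnd
    simp only [List.foldl_cons]
    rcases List.mem_cons.mp hk with h | h
    · subst h
      rw [pv_dstep_get?_of_not_mem _ _ _ _ (List.nodup_cons.mp hnd).1]
      split
      · rw [PySem.Dict.get?_setdefault_self]
        cases hd : d.get? k <;> simp
      · cases hd : d.get? k <;> simp
    · have hne : k ≠ s := by
        rintro rfl; exact (List.nodup_cons.mp hnd).1 h
      rw [ih _ h (List.nodup_cons.mp hnd).2]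
      split
      · rw [PySem.Dict.get?_setdefault_of_ne _ _ hne]
      · rfl

lemma pv_bfold_dict (names : List String) (k : String) (hk : k ∈ pvSuffixes) :
    ∀ (p f : Option String) (d : PySem.Dict String String),
      ((names.foldl pvBStep (p, f, d)).2.2).get? k
        = (d.get? k).or (names.find? (fun n => PySem.Str.endswith n k)) := by
  have hnd : pvSuffixes.Nodup := by decide
  induction names with
  | nil => intro p f d; simp
  | cons n rest ih =>
    intro p f d
    simp only [List.foldl_cons, pvBStep, ih, List.find?_cons]
    rw [pv_dstep_get? _ _ _ _ hk hnd]
    cases hd : d.get? k <;> cases h : PySem.Str.endswith n k <;> simp [h, Option.or_assoc]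

lemma pv_component (names : List String) (k : String) (hk : k ∈ pvSuffixes) :
    ((names.foldl pvBStep (none, none, PySem.Dict.empty)).2.2).get? k
      = pvFindOne names k := by
  rw [pv_bfold_dict _ _ hk, pv_findOne_eq_find?]
  simp

lemma pv_instance_eq (names : List String) :
    (if (pvInstLoop names).getD "" = "" then (names.filter pvCandP).head? else pvInstLoop names)
      = (match names.find? pvPrimaryP with
         | some n => some n
         | none => names.find? pvFallbackP) := by
  rw [pv_instLoop_eq_find?, pv_head?_filter_eq_find?, pv_candP_eq, ← pv_instP_eq_fun]
  cases hfind : names.find? pvInstP with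
  | none => simp
  | some n =>
    have hne : n ≠ "" := pv_instP_ne_empty n (List.find?_some hfind)
    simp [hne]

-- ===== VERDICT (by name: the statement is the Claim_ definition above) =====
theorem pick_xbrl_artifacts_spec : Claim_equal_pick_xbrl_artifacts := by
  intro items _ _
  simp only [Spec_pick_xbrl_artifacts, pick_xbrl_artifacts, pick_xbrl_artifacts_alt]
  rw [show items.foldl (fun st it => pvBStep st (pvGetName it)) (none, none, PySem.Dict.empty)
        = (items.map pvGetName).foldl pvBStep (none, none, PySem.Dict.empty)
      from List.foldl_map.symm]
  rw [pv_component _ "_pre.xml" (by decide), pv_component _ "_def.xml" (by decide),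
      pv_component _ "_lab.xml" (by decide), pv_component _ "_cal.xml" (by decide)]
  simp only [pv_bfold_fst, pv_bfold_snd, Option.none_or]
  rw [pv_instance_eq]
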